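-- pv_equiv track=rewrite | github.com/SujashB/M3-SportCast | sequence_analysis.py | extract_sequences_from_timeline
-- ===== SOURCE A (Python) =====
-- def extract_sequences_from_timeline(timeline_data, min_gap=10):
--     """
--     Extract technique sequences from timeline data
--
--     Args:
--         timeline_data: List of (frame_idx, technique) tuples
--         min_gap: Minimum frame gap to consider as sequence break
--
--     Returns:
--         sequences: List of technique sequences
--     """
--     if not timeline_data:
--         return []
--
--     sequences = []
--     current_sequence = []
--     prev_frame = None
--
--     # Sort timeline by frame index
--     sorted_timeline = sorted(timeline_data, key=lambda x: x[0])
--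
--     for frame_idx, technique in sorted_timeline:
--         # Start new sequence if gap is too large
--         if prev_frame is not None and frame_idx - prev_frame > min_gap:
--             if current_sequence:
--                 sequences.append(current_sequence)
--             current_sequence = []
--
--         # Add technique to current sequence
--         current_sequence.append(technique)
--         prev_frame = frame_idx
--
--     # Add final sequence
--     if current_sequence:
--         sequences.append(current_sequence)
--
--     return sequences
-- ===== SOURCE B (Python) =====
-- def extract_sequences_from_timeline(timeline_data, min_gap=10):
--     """Label each sorted entry with a group id (the prefix count of large
--     gaps before it), then bucket techniques by group id in a dict and
--     return the buckets in key-creation order."""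
--     st = sorted(timeline_data, key=lambda x: x[0])
--     labels = [0]
--     for prev, cur in zip(st, st[1:]):
--         labels.append(labels[-1] + (1 if cur[0] - prev[0] > min_gap else 0))
--     buckets = {}
--     for lab, (_, tech) in zip(labels, st):
--         buckets.setdefault(lab, []).append(tech)
--     return list(buckets.values())
-- ===== Notes on version B (the rewrite author's own statement) =====
-- stated objective: alternative
-- what changed: A's single streaming pass with flush/prev bookkeeping is replaced by a group-by: a prefix-sum pass labels each sorted entry with the count of large gaps before it, then a dict keyed by that group id buckets the techniques and the dict's values are returned.
import Mathlib
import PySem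

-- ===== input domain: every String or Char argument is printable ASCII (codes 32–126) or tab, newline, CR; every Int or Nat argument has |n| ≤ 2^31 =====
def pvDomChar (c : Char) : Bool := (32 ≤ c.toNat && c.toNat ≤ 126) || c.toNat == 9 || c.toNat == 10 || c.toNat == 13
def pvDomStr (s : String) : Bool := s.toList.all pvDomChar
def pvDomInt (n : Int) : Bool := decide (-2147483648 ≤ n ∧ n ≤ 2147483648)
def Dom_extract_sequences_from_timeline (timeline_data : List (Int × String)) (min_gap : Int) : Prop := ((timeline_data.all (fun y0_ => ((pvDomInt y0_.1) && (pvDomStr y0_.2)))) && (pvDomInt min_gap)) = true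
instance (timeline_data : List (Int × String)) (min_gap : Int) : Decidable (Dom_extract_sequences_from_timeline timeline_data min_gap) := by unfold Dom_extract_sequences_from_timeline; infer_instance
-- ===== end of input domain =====

-- B replaces A's streaming flush/prev pass by gap-prefix-sum labelling plus dict bucketing (group-by on group ids); alternative decomposition, same cost.


-- ===== PORT A =====
-- one loop step of A: maybe flush current_sequence on a large gap, then append the technique
def pvStepA (g : Int) (s : List (List String) × List String × Option Int) (p : Int × String) :
    List (List String) × List String × Option Int :=
  let s1 :=
    match s.2.2 with
    | some pf =>
        if p.1 - pf > g then ((if s.2.1 ≠ [] then s.1 ++ [s.2.1] else s.1), ([] : List String))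
        else (s.1, s.2.1)
    | none => (s.1, s.2.1)
  (s1.1, s1.2 ++ [p.2], some p.1)

def extract_sequences_from_timeline (timeline_data : List (Int × String)) (min_gap : Int) : List (List String) :=
  if timeline_data = [] then []
  else
    let st := PySem.List.sorted timeline_data (fun x => x.1) false
    let r := st.foldl (pvStepA min_gap) ([], [], none)
    if r.2.1 ≠ [] then r.1 ++ [r.2.1] else r.1

-- ===== PORT B =====
-- first loop of B: labels.append(labels[-1] + (1 if cur[0] - prev[0] > min_gap else 0))
def pvStepLab (g : Int) (ls : List Int) (p : (Int × String) × (Int × String)) : List Int :=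
  ls ++ [(PySem.List.pyGet? ls (-1)).getD 0 + (if p.2.1 - p.1.1 > g then 1 else 0)]

def extract_sequences_from_timeline_alt (timeline_data : List (Int × String)) (min_gap : Int) : List (List String) :=
  let st := PySem.List.sorted timeline_data (fun x => x.1) false
  let labels := (st.zip st.tail).foldl (pvStepLab min_gap) [0]
  let buckets := (labels.zip st).foldl
    (fun d p => d.modify p.1 ([] : List String) (fun s => s ++ [p.2.2])) PySem.Dict.empty
  buckets.values

-- ===== PRECONDITION & SPEC =====
def Spec_extract_sequences_from_timeline (timeline_data : List (Int × String)) (min_gap : Int) (out : List (List String)) : Prop := out = extract_sequences_from_timeline_alt timeline_data min_gap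
instance (timeline_data : List (Int × String)) (min_gap : Int) (out : List (List String)) : Decidable (Spec_extract_sequences_from_timeline timeline_data min_gap out) := by unfold Spec_extract_sequences_from_timeline; infer_instance

-- ===== CLAIM (what is proved, stated in full; the proofs are below) =====
def Claim_equal_extract_sequences_from_timeline : Prop := ∀ (timeline_data : List (Int × String)) (min_gap : Int), Dom_extract_sequences_from_timeline timeline_data min_gap → Spec_extract_sequences_from_timeline timeline_data min_gap (extract_sequences_from_timeline timeline_data min_gap)

-- ===== LEMMAS AND PROOFS =====

-- labelled stream (label, (frame, tech)) starting at label L after previous frame prev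
def pvZlab (g L prev : Int) : List (Int × String) → List (Int × (Int × String))
  | [] => []
  | (f, t) :: r =>
      if f - prev > g then (L + 1, (f, t)) :: pvZlab g (L + 1) f r
      else (L, (f, t)) :: pvZlab g L f r

-- same stream projected to (label, tech)
def pvQ (g L prev : Int) : List (Int × String) → List (Int × String)
  | [] => []
  | (f, t) :: r =>
      if f - prev > g then (L + 1, t) :: pvQ g (L + 1) f r
      else (L, t) :: pvQ g L f r

-- canonical run decomposition (maximal small-gap run, then remainder)
def pvTakeRun (g prev : Int) : List (Int × String) → List String × List (Int × String)
  | [] => ([], [])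
  | (f, t) :: rest =>
      if f - prev ≤ g then
        let r := pvTakeRun g f rest
        (t :: r.1, r.2)
      else ([], (f, t) :: rest)

theorem pvTakeRun_snd_length (g prev : Int) (xs : List (Int × String)) :
    (pvTakeRun g prev xs).2.length ≤ xs.length := by
  induction xs generalizing prev with
  | nil => simp [pvTakeRun]
  | cons p rest ih =>
      obtain ⟨f, t⟩ := p
      by_cases h : f - prev ≤ g
      · simpa [pvTakeRun, h] using le_trans (ih f) (Nat.le_succ _)
      · simp [pvTakeRun, h]

def pvRuns (g : Int) : List (Int × String) → List (List String)
  | [] => []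
  | (f, t) :: rest =>
      let r := pvTakeRun g f rest
      (t :: r.1) :: pvRuns g r.2
termination_by xs => xs.length
decreasing_by
  exact Nat.lt_succ_of_le (pvTakeRun_snd_length _ _ _)

-- group-by of a labelled stream: distinct labels in first-occurrence order, each with its techniques
def pvGroupOut (q : List (Int × String)) : List (List String) :=
  (PySem.Set.ofList (q.map (·.1))).map (fun c => (q.filter (fun p => p.1 == c)).map (·.2))

theorem pvZlab_map_snd (g L prev : Int) (l : List (Int × String)) :
    (pvZlab g L prev l).map (·.2) = l := by
  induction l generalizing L prev with
  | nil => simp [pvZlab]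
  | cons p r ih => obtain ⟨f, t⟩ := p; by_cases h : f - prev > g <;> simp [pvZlab, h, ih]

theorem pvZlab_map_pvQ (g L prev : Int) (l : List (Int × String)) :
    (pvZlab g L prev l).map (fun z => (z.1, z.2.2)) = pvQ g L prev l := by
  induction l generalizing L prev with
  | nil => simp [pvZlab, pvQ]
  | cons p r ih => obtain ⟨f, t⟩ := p; by_cases h : f - prev > g <;> simp [pvZlab, pvQ, h, ih]

theorem pyGet_neg_one_append (acc : List Int) (a : Int) :
    PySem.List.pyGet? (acc ++ [a]) (-1) = some a := by
  simp [PySem.List.pyGet?, PySem.List.pyIdx?]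

-- A's labels loop over zip(st, st[1:]) computes the labels of pvZlab
theorem foldl_pvStepLab (g : Int) (l : List (Int × String)) :
    ∀ (x : Int × String) (acc : List Int) (L : Int),
      PySem.List.pyGet? acc (-1) = some L →
      ((x :: l).zip l).foldl (pvStepLab g) acc = acc ++ (pvZlab g L x.1 l).map (·.1) := by
  induction l with
  | nil => intro x acc L _; simp [pvZlab]
  | cons y r ih =>
      intro x acc L hL
      by_cases h : y.1 - x.1 > g
      · have := ih y (acc ++ [L + 1]) (L + 1) (pyGet_neg_one_append _ _)
        simp only [List.zip_cons_cons, List.foldl_cons, pvStepLab, hL, Option.getD_some,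
          h] at this ⊢
        cases y with
        | mk f t => simp [pvZlab, h, this, List.append_assoc]
      · have := ih y (acc ++ [L]) L (pyGet_neg_one_append acc L)
        simp only [List.zip_cons_cons, List.foldl_cons, pvStepLab, hL, Option.getD_some,
          if_neg h, add_zero] at this ⊢
        cases y with
        | mk f t => simp [pvZlab, h, this, List.append_assoc]

-- run decomposition of the labelled stream
theorem pvQ_run (g : Int) (l : List (Int × String)) :
    ∀ (f L : Int),
      pvQ g L f l = (pvTakeRun g f l).1.map (fun t => (L, t)) ++
        (match (pvTakeRun g f l).2 with
         | [] => []
         | (f', t') :: r' => (L + 1, t') :: pvQ g (L + 1) f' r') := by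
  induction l with
  | nil => intro f L; simp [pvQ, pvTakeRun]
  | cons p r ih =>
      intro f L
      obtain ⟨f1, t1⟩ := p
      by_cases h : f1 - f ≤ g
      · have h' : ¬ f1 - f > g := by omega
        simp [pvQ, pvTakeRun, h, h', ih f1 L]
      · have h' : f1 - f > g := by omega
        simp [pvQ, pvTakeRun, h, h']

theorem pvQ_label_le (g : Int) (l : List (Int × String)) :
    ∀ (f L : Int) (p : Int × String), p ∈ pvQ g L f l → L ≤ p.1 := by
  induction l with
  | nil => intro f L p hp; simp [pvQ] at hp
  | cons x r ih =>
      intro f L p hp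
      obtain ⟨f1, t1⟩ := x
      by_cases h : f1 - f > g
      · simp only [pvQ, if_pos h, List.mem_cons] at hp
        rcases hp with rfl | hp
        · simp
        · have := ih f1 (L + 1) p hp; omega
      · simp only [pvQ, if_neg h, List.mem_cons] at hp
        rcases hp with rfl | hp
        · simp
        · exact ih f1 L p hp

theorem set_update_const (L : Int) (ls : List Int) (h : ∀ x ∈ ls, x = L) :
    PySem.Set.update [L] ls = [L] := by
  induction ls with
  | nil => simp [PySem.Set.update]
  | cons x r ih =>
      have hx : x = L := h x (by simp)
      rw [PySem.Set.update_cons]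
      rw [hx, PySem.Set.add_of_mem (by simp)]
      exact ih (fun y hy => h y (by simp [hy]))

theorem set_ofList_const_prefix (L : Int) (ls1 ls2 : List Int)
    (h1 : ∀ x ∈ ls1, x = L) (h2 : L ∉ ls2) :
    PySem.Set.ofList (L :: (ls1 ++ ls2)) = L :: PySem.Set.ofList ls2 := by
  have e1 : PySem.Set.ofList (L :: (ls1 ++ ls2))
      = PySem.Set.update (PySem.Set.update [L] ls1) ls2 := by
    rw [show L :: (ls1 ++ ls2) = ([L] ++ ls1) ++ ls2 by simp,
      PySem.Set.ofList_append, PySem.Set.ofList_append]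
    congr 1
  rw [e1, set_update_const L ls1 h1, PySem.Set.update_eq_append_filter]
  have : (PySem.Set.ofList ls2).filter (fun y => !(PySem.Set.contains [L] y))
      = PySem.Set.ofList ls2 := by
    apply List.filter_eq_self.mpr
    intro y hy
    have hyL : y ≠ L := by
      intro hEq; exact h2 (by simpa [hEq] using (PySem.Set.mem_ofList _ _).mp hy)
    simp [PySem.Set.contains, hyL]
  rw [this]; rfl

-- main lemma: group-by of the labelled stream is the run decomposition
theorem pvGroupOut_pvQ (g : Int) :
    ∀ (n : Nat) (l : List (Int × String)), l.length ≤ n →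
      ∀ (L f : Int) (t : String),
        pvGroupOut ((L, t) :: pvQ g L f l) = pvRuns g ((f, t) :: l) := by
  intro n
  induction n with
  | zero =>
      intro l hl L f t
      have : l = [] := List.length_eq_zero_iff.mp (Nat.le_zero.mp hl)
      subst this
      simp [pvGroupOut, pvQ, pvRuns, pvTakeRun, PySem.Set.ofList]
  | succ n ih =>
      intro l hl L f t
      have hq := pvQ_run g l f L
      set TR := pvTakeRun g f l with hTR
      -- the tail segment
      rcases hsnd : TR.2 with _ | ⟨⟨f', t'⟩, r'⟩
      · -- no break: single group
        rw [hsnd] at hq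
        simp only [List.append_nil] at hq
        have hruns : pvRuns g ((f, t) :: l) = [(t :: TR.1)] := by
          rw [pvRuns]; rw [← hTR, hsnd, pvRuns]
        rw [hruns]
        unfold pvGroupOut
        rw [hq]
        have hlab : ((L, t) :: TR.1.map (fun t => (L, t))).map (·.1)
            = L :: (TR.1.map (fun t => (L, t))).map (·.1) := by simp
        have hofl : PySem.Set.ofList (((L, t) :: TR.1.map (fun t => (L, t))).map (·.1))
            = [L] := by
          rw [hlab]
          have := set_ofList_const_prefix L ((TR.1.map (fun t => (L, t))).map (·.1)) []
            (by intro x hx; simp at hx; obtain ⟨a, _, hx⟩ := hx; omega) (by simp)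
          simpa using this
        rw [hofl]
        simp [List.filter_eq_self.mpr, List.map_map]
      · -- break: head group, then recurse on the remainder
        rw [hsnd] at hq
        have hlen' : r'.length ≤ n := by
          have h1 := pvTakeRun_snd_length g f l
          rw [← hTR, hsnd] at h1
          simp at h1; omega
        have hruns : pvRuns g ((f, t) :: l)
            = (t :: TR.1) :: pvRuns g ((f', t') :: r') := by
          rw [pvRuns]; rw [← hTR, hsnd]
        rw [hruns, ← ih r' hlen' (L + 1) f' t']
        -- abbreviations
        set tailq : List (Int × String) := (L + 1, t') :: pvQ g (L + 1) f' r' with htailq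
        have htail_gt : ∀ p ∈ tailq, L < p.1 := by
          intro p hp
          rw [htailq] at hp
          rcases List.mem_cons.mp hp with rfl | hp
          · simp
          · have := pvQ_label_le g r' f' (L + 1) p hp; omega
        unfold pvGroupOut
        rw [hq]
        have hlabels : (((L, t) :: (TR.1.map (fun t => (L, t)) ++ tailq)).map (·.1))
            = L :: ((TR.1.map (fun t => (L, t))).map (·.1) ++ tailq.map (·.1)) := by simp
        have hofl : PySem.Set.ofList (((L, t) :: (TR.1.map (fun t => (L, t)) ++ tailq)).map (·.1))
            = L :: PySem.Set.ofList (tailq.map (·.1)) := by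
          rw [hlabels]
          exact set_ofList_const_prefix L _ _
            (by intro x hx; simp at hx; obtain ⟨a, _, hx⟩ := hx; omega)
            (by intro hmem; simp only [List.mem_map] at hmem
                obtain ⟨p, hp, hp1⟩ := hmem
                exact absurd hp1 (by have := htail_gt p hp; omega))
        rw [hofl, List.map_cons]
        congr 1
        · -- the head group collects exactly the first run
          have hfilter : (((L, t) :: (TR.1.map (fun t => (L, t)) ++ tailq)).filter
              (fun p => p.1 == L)) = (L, t) :: TR.1.map (fun t => (L, t)) := by
            simp only [List.filter_cons, List.filter_append]
            have h1 : (TR.1.map (fun t => (L, t))).filter (fun p => p.1 == L)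
                = TR.1.map (fun t => (L, t)) :=
              List.filter_eq_self.mpr (by intro p hp; simp at hp; obtain ⟨a, _, hp⟩ := hp
                                          simp [← hp])
            have h2 : tailq.filter (fun p => p.1 == L) = [] :=
              List.filter_eq_nil_iff.mpr (by intro p hp
                                             have := htail_gt p hp
                                             simp; omega)
            simp [h1, h2]
          rw [hfilter]
          simp [List.map_map]
        · -- the remaining groups come from the tail segment only
          apply List.map_congr_left
          intro c hc
          have hcL : L < c := by
            obtain ⟨p, hp, hp1⟩ := List.mem_map.mp ((PySem.Set.mem_ofList _ _).mp hc)
            have := htail_gt p hp; omega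
          congr 1
          have h0 : ((L, t).1 == c) = false := by simp; omega
          have h1 : (TR.1.map (fun t => (L, t))).filter (fun p => p.1 == c) = [] :=
            List.filter_eq_nil_iff.mpr (by intro p hp; simp at hp; obtain ⟨a, _, hp⟩ := hp
                                           simp [← hp]; omega)
          simp [htailq, List.filter_cons, List.filter_append, h0, h1]

-- A's fold with flush equals the run decomposition (invariant of A's loop)
theorem foldA_runs (g : Int) (xs : List (Int × String)) :
    ∀ (prev : Int) (seqs : List (List String)) (cur : List String), cur ≠ [] →
    (let r := xs.foldl (pvStepA g) (seqs, cur, some prev)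
     if r.2.1 ≠ [] then r.1 ++ [r.2.1] else r.1)
      = seqs ++ (cur ++ (pvTakeRun g prev xs).1) :: pvRuns g (pvTakeRun g prev xs).2 := by
  induction xs with
  | nil => intro prev seqs cur hcur; simp [pvTakeRun, pvRuns, hcur]
  | cons p rest ih =>
      intro prev seqs cur hcur
      obtain ⟨f, t⟩ := p
      by_cases h : f - prev ≤ g
      · have hgap : ¬ f - prev > g := by omega
        have := ih f seqs (cur ++ [t]) (by simp)
        simpa [pvStepA, hgap, pvTakeRun, h, List.append_assoc] using this
      · have hgap : f - prev > g := by omega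
        have := ih f (seqs ++ [cur]) [t] (by simp)
        simp only [pvTakeRun, if_neg h]
        simp [pvStepA, hgap, hcur, pvRuns] at this ⊢
        simp [this]

theorem sorted_ne_nil (timeline_data : List (Int × String)) (h : timeline_data ≠ []) :
    PySem.List.sorted timeline_data (fun x => x.1) false ≠ [] := by
  intro hs
  have := PySem.List.sorted_perm (xs := timeline_data) (key := fun x => x.1) (rev := false)
  rw [hs] at this
  exact h (List.Perm.nil_eq this).symm

-- A's port equals the run decomposition of the sorted list
theorem portA_eq_runs (timeline_data : List (Int × String)) (min_gap : Int) :
    extract_sequences_from_timeline timeline_data min_gap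
      = pvRuns min_gap (PySem.List.sorted timeline_data (fun x => x.1) false) := by
  unfold extract_sequences_from_timeline
  by_cases hnil : timeline_data = []
  · subst hnil; simp [PySem.List.sorted, pvRuns]
  · simp only [if_neg hnil]
    cases hst : PySem.List.sorted timeline_data (fun x => x.1) false with
    | nil => exact absurd hst (sorted_ne_nil timeline_data hnil)
    | cons p rest =>
        obtain ⟨f, t⟩ := p
        have h0 : pvStepA min_gap ([], [], none) (f, t) = ([], [t], some f) := by
          simp [pvStepA]
        have := foldA_runs min_gap rest f [] [t] (by simp)
        simpa [List.foldl_cons, h0, pvRuns] using this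

-- B's port equals the group-by of the labelled stream, hence the run decomposition
theorem portB_eq_runs (timeline_data : List (Int × String)) (min_gap : Int) :
    extract_sequences_from_timeline_alt timeline_data min_gap
      = pvRuns min_gap (PySem.List.sorted timeline_data (fun x => x.1) false) := by
  simp only [extract_sequences_from_timeline_alt]
  cases hst : PySem.List.sorted timeline_data (fun x => x.1) false with
  | nil => simp [pvRuns, PySem.Dict.values, PySem.Dict.empty]
  | cons p l =>
      obtain ⟨f0, t0⟩ := p
      -- labels list
      have hlabels : (((f0, t0) :: l).zip (((f0, t0) :: l).tail)).foldl (pvStepLab min_gap) [0]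
          = 0 :: (pvZlab min_gap 0 f0 l).map (·.1) := by
        have := foldl_pvStepLab min_gap l (f0, t0) [0] 0 (by rfl)
        simpa using this
      rw [hlabels]
      -- the zipped stream is the labelled stream
      have hzip : ((0 :: (pvZlab min_gap 0 f0 l).map (·.1)).zip ((f0, t0) :: l))
          = (0, (f0, t0)) :: pvZlab min_gap 0 f0 l := by
        rw [List.zip_cons_cons]
        congr 1
        set zl := pvZlab min_gap 0 f0 l with hzl
        have hsnd : zl.map (·.2) = l := pvZlab_map_snd min_gap 0 f0 l
        rw [← hsnd, List.zip_map']
        simp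
      rw [hzip]
      -- the bucket fold is a fold over (label, tech) pairs
      have hfold : ((0, (f0, t0)) :: pvZlab min_gap 0 f0 l).foldl
            (fun d p => d.modify p.1 ([] : List String) (fun s => s ++ [p.2.2])) PySem.Dict.empty
          = (((0, (f0, t0)) :: pvZlab min_gap 0 f0 l).map (fun z => (z.1, z.2.2))).foldl
            (fun d r => d.modify r.1 ([] : List String) (fun s => s ++ [r.2])) PySem.Dict.empty := by
        rw [List.foldl_map]
      rw [hfold]
      have hmapq : ((0, (f0, t0)) :: pvZlab min_gap 0 f0 l).map (fun z => (z.1, z.2.2))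
          = (0, t0) :: pvQ min_gap 0 f0 l := by
        simp [pvZlab_map_pvQ]
      rw [hmapq]
      -- values of the bucket dict = group-by of the labelled stream
      set q : List (Int × String) := (0, t0) :: pvQ min_gap 0 f0 l with hq
      set d := q.foldl (fun d r => d.modify r.1 ([] : List String) (fun s => s ++ [r.2]))
        PySem.Dict.empty with hd
      have hnodup : d.keys.Nodup := by
        rw [hd]
        exact PySem.Dict.nodup_keys_foldl_modify_key q (fun r => r.1) []
          (fun _ r => fun s => s ++ [r.2]) PySem.Dict.empty (by simp)
      have hkeys : d.keys = PySem.Set.ofList (q.map (·.1)) := by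
        rw [hd]
        have := PySem.Dict.keys_foldl_modify_key (l := q) (key := fun r => r.1)
          (d0 := ([] : List String)) (f := fun _ r => fun s => s ++ [r.2])
          (d := PySem.Dict.empty)
        rw [this]
        simp [PySem.Dict.empty, PySem.Set.update_nil_left]
      have hgetD : ∀ c, d.getD c [] = (q.filter (fun p => p.1 == c)).map (·.2) := by
        intro c
        rw [hd]
        have := PySem.Dict.getD_foldl_modify_append (l := q) (d := PySem.Dict.empty) (c := c)
        simpa using this
      have hvals : d.values = d.keys.map (fun k => d.getD k []) :=
        PySem.Dict.values_eq_map_keys d hnodup []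
      rw [hvals, hkeys]
      have : (PySem.Set.ofList (q.map (·.1))).map (fun k => d.getD k [])
          = (PySem.Set.ofList (q.map (·.1))).map
              (fun c => (q.filter (fun p => p.1 == c)).map (·.2)) :=
        List.map_congr_left (fun c _ => hgetD c)
      rw [this]
      exact pvGroupOut_pvQ min_gap l.length l (le_refl _) 0 f0 t0

-- ===== VERDICT (by name: the statement is the Claim_ definition above) =====
theorem extract_sequences_from_timeline_spec : Claim_equal_extract_sequences_from_timeline := by
  intro timeline_data min_gap _
  unfold Spec_extract_sequences_from_timeline
  rw [portA_eq_runs, portB_eq_runs]
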